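-- pv_equiv track=rewrite | github.com/novdex/bob-agent | mind-clone/scripts/bob_agent_loop.py | _get_fail_count
-- ===== SOURCE A (Python) =====
-- def _get_fail_count(content: str) -> int:
--     """Extract fail count from task metadata."""
--     for line in content.split("\n"):
--         if line.strip().startswith("fail_count:"):
--             try:
--                 return int(line.split(":")[1].strip())
--             except (ValueError, IndexError):
--                 return 0
--     return 0
-- ===== SOURCE B (Python) =====
-- def _get_fail_count(content: str) -> int:
--     """Extract fail count by a single character-level scan (streaming automaton):
--     no line list is built; `state` counts matched chars of the label on the current
--     line (-1 = line cannot match), `buf` collects the value once the label closed."""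
--     LABEL = "fail_count:"
--     state = 0
--     buf = None
--     for ch in content:
--         if ch == "\n":
--             if buf is not None:
--                 break
--             state = 0
--         elif buf is not None:
--             if ch == ":":
--                 break
--             buf += ch
--         elif state == -1:
--             pass
--         elif ch == LABEL[state]:
--             state += 1
--             if state == len(LABEL):
--                 buf = ""
--         elif state == 0 and ch.isspace():
--             pass
--         else:
--             state = -1
--     if buf is None:
--         return 0
--     try:
--         return int(buf.strip())
--     except ValueError:
--         return 0
-- ===== Notes on version B (the rewrite author's own statement) =====
-- stated objective: alternative
-- what changed: B replaces A's build-a-line-list-then-per-line-strip/startswith/split algorithm by a single character-level streaming automaton: one pass over the string tracking how many characters of 'fail_count:' are matched on the current line and collecting the value characters once the label closes, with no intermediate line list or per-line splits.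
import Mathlib
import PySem

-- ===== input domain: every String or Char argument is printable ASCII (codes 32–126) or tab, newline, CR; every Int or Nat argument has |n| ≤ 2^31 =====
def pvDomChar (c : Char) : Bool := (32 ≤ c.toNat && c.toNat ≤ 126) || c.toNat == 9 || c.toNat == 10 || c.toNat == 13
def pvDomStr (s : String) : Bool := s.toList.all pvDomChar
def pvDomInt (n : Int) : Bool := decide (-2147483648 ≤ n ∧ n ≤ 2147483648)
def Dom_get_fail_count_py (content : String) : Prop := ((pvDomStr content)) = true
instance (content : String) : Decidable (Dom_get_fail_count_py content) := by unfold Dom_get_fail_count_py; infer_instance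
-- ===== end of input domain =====

-- B replaces A's split-into-lines-then-strip/startswith/split processing by a single
-- character-level streaming automaton over the string (no intermediate line list);
-- objective: alternative algorithm, same asymptotic cost.

-- ===== PORT A =====
-- A's for-loop over content.split("\n") with early return, as structural recursion

def getFailA : List (List Char) → Int
  | [] => 0
  | line :: rest =>
    if PySem.Chars.startswith (PySem.Chars.strip line) "fail_count:".toList then
      match PySem.List.pyGet? (PySem.Chars.splitOn line [':']) 1 with
      | none => 0
      | some piece =>
        match PySem.Int.ofChars? (PySem.Chars.strip piece) with
        | none => 0
        | some n => n
    else getFailA rest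

def get_fail_count_py (content : String) : Int :=
  getFailA (PySem.Chars.splitOn content.toList ['\n'])

-- ===== PORT B =====
-- B's streaming automaton: `state` = number of chars of LABEL matched on the current
-- line (-1 = the current line can no longer match), `buf` = collected value chars once
-- the label (incl. its ':') was fully matched; the for-loop with break/early state is
-- the structural recursion below, branch for branch.

def pvLabel : List Char := "fail_count:".toList

def scanB : List Char → Int → Option (List Char) → Option (List Char)
  | [], _, buf => buf
  | c :: cs, state, buf =>
    if c = '\n' then
      if buf.isSome then buf else scanB cs 0 none
    else
      match buf with
      | some b => if c = ':' then some b else scanB cs state (some (b ++ [c]))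
      | none =>
        if state = -1 then scanB cs (-1) none
        else if some c = PySem.List.pyGet? pvLabel state then
          (if state + 1 = (pvLabel.length : Int) then scanB cs (state + 1) (some [])
           else scanB cs (state + 1) none)
        else if state = 0 ∧ PySem.Chars.isspace c = true then scanB cs 0 none
        else scanB cs (-1) none

def get_fail_count_py_alt (content : String) : Int :=
  match scanB content.toList 0 none with
  | none => 0
  | some b => (PySem.Int.ofChars? (PySem.Chars.strip b)).getD 0

-- ===== PRECONDITION & SPEC =====
def Spec_get_fail_count_py (content : String) (out : Int) : Prop := out = get_fail_count_py_alt content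
instance (content : String) (out : Int) : Decidable (Spec_get_fail_count_py content out) := by unfold Spec_get_fail_count_py; infer_instance

-- ===== CLAIM (what is proved, stated in full; the proofs are below) =====
def Claim_equal_get_fail_count_py : Prop := ∀ (content : String), Dom_get_fail_count_py content → Spec_get_fail_count_py content (get_fail_count_py content)

-- ===== LEMMAS AND PROOFS =====

-- str.split(sep) for a one-char separator, as a first-occurrence recursion
def pypart (sep : Char) : List Char → Option (List Char × List Char)
  | [] => none
  | c :: cs =>
    if c = sep then some ([], cs)
    else (pypart sep cs).map (fun p => (c :: p.1, p.2))

theorem pypart_some_iff (sep : Char) : ∀ (cs h t : List Char),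
    pypart sep cs = some (h, t) ↔ cs = h ++ sep :: t ∧ sep ∉ h := by
  intro cs
  induction cs with
  | nil => intro h t; simp [pypart]
  | cons c cs ih =>
    intro h t
    by_cases hc : c = sep
    · subst hc
      cases h with
      | nil => simp [pypart]
      | cons x h' => simp [pypart]; rintro rfl; simp
    · cases h with
      | nil => simp [pypart, hc]
      | cons x h' =>
        simp only [pypart, if_neg hc, Option.map_eq_some_iff]
        constructor
        · rintro ⟨⟨a, b⟩, hp, he⟩
          simp only [Prod.mk.injEq, List.cons.injEq] at he
          obtain ⟨⟨he1, he2⟩, he3⟩ := he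
          subst he1; subst he2; subst he3
          obtain ⟨h1, h2⟩ := (ih _ _).mp hp
          subst h1
          refine ⟨by simp, ?_⟩
          simp only [List.mem_cons, not_or]
          exact ⟨fun hh => hc hh.symm, h2⟩
        · rintro ⟨he, hn⟩
          simp only [List.cons_append, List.cons.injEq] at he
          obtain ⟨rfl, rfl⟩ := he
          exact ⟨(h', t), (ih h' t).mpr ⟨rfl, fun hm => hn (List.mem_cons_of_mem _ hm)⟩, rfl⟩

theorem pypart_none_iff (sep : Char) : ∀ (cs : List Char),
    pypart sep cs = none ↔ sep ∉ cs := by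
  intro cs
  induction cs with
  | nil => simp [pypart]
  | cons c cs ih =>
    by_cases hc : c = sep
    · subst hc; simp [pypart]
    · simp [pypart, hc, ih]
      exact fun _ h => hc h.symm

def mySplit (c : Char) (pre : List Char) : List Char → List (List Char)
  | [] => [pre]
  | x :: xs => if x = c then pre :: mySplit c [] xs else mySplit c (pre ++ [x]) xs

theorem mySplit_eq_part (c : Char) : ∀ (l pre : List Char),
    mySplit c pre l = match pypart c l with
      | none => [pre ++ l]
      | some (a, b) => (pre ++ a) :: mySplit c [] b := by
  intro l
  induction l with
  | nil => intro pre; simp [mySplit, pypart]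
  | cons x xs ih =>
    intro pre
    by_cases hx : x = c
    · subst hx; simp [mySplit, pypart]
    · simp only [mySplit, if_neg hx, pypart, ih]
      cases hp : pypart c xs with
      | none => simp
      | some p => obtain ⟨a, b⟩ := p; simp

theorem go_eq (c : Char) : ∀ (fuel : Nat) (l cur : List Char) (acc : List (List Char)),
    l.length ≤ fuel →
    PySem.Chars.splitOn.go [c] fuel l cur acc = acc.reverse ++ mySplit c cur.reverse l := by
  intro fuel
  induction fuel with
  | zero =>
    intro l cur acc hl
    have hnil : l = [] := List.eq_nil_of_length_eq_zero (Nat.le_zero.mp hl)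
    subst hnil
    simp [PySem.Chars.splitOn.go, mySplit]
  | succ f ih =>
    intro l cur acc hl
    cases l with
    | nil => simp [PySem.Chars.splitOn.go, mySplit]
    | cons c' rest =>
      have hlen : rest.length ≤ f := by simpa using hl
      by_cases hc : c = c'
      · subst hc
        have hpre : List.isPrefixOf [c] (c :: rest) = true := by simp [List.isPrefixOf]
        simp only [PySem.Chars.splitOn.go, hpre, if_true]
        simp only [List.length_cons, List.length_nil, List.drop_succ_cons, List.drop_zero]
        rw [ih rest [] (cur.reverse :: acc) hlen]
        simp [mySplit]
      · have hpre : List.isPrefixOf [c] (c' :: rest) = false := by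
          simp [List.isPrefixOf, hc]
        simp only [PySem.Chars.splitOn.go, hpre, Bool.false_eq_true, if_false]
        rw [ih rest (c' :: cur) acc hlen]
        have hms : mySplit c cur.reverse (c' :: rest) = mySplit c (cur.reverse ++ [c']) rest := by
          simp only [mySplit]
          rw [if_neg (fun hh => hc (Eq.symm hh))]
        rw [hms]
        simp

theorem splitOn_char (c : Char) (cs : List Char) :
    PySem.Chars.splitOn cs [c] = mySplit c [] cs := by
  unfold PySem.Chars.splitOn
  simpa using go_eq c (cs.length + 1) cs [] [] (by omega)

theorem mySplit_first (c : Char) : ∀ (u pre : List Char),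
    ∃ r, mySplit c pre u = (pre ++ u.takeWhile (· ≠ c)) :: r := by
  intro u
  induction u with
  | nil => intro pre; exact ⟨[], by simp [mySplit]⟩
  | cons x xs ih =>
    intro pre
    by_cases hx : x = c
    · refine ⟨mySplit c [] xs, ?_⟩
      simp [mySplit, hx]
    · obtain ⟨r, hr⟩ := ih (pre ++ [x])
      refine ⟨r, ?_⟩
      simp only [mySplit, if_neg hx, hr, List.takeWhile]
      simp [hx]

theorem rstrip_prefix (X : List Char) : PySem.Chars.rstrip X <+: X := by
  have h := List.dropWhile_suffix (l := X.reverse) PySem.Chars.isspace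
  have h2 := (List.reverse_prefix (l₁ := List.dropWhile PySem.Chars.isspace X.reverse)
    (l₂ := X.reverse)).mpr h
  simpa [PySem.Chars.rstrip] using h2

theorem mem_takeWhile_sat {p : Char → Bool} : ∀ {l : List Char} {x : Char},
    x ∈ List.takeWhile p l → p x = true := by
  intro l
  induction l with
  | nil => intro x h; simp at h
  | cons y ys ih =>
    intro x h
    by_cases hy : p y = true
    · simp only [List.takeWhile_cons, hy, if_true, List.mem_cons] at h
      rcases h with rfl | h
      · exact hy
      · exact ih h
    · simp [hy] at h

-- A's per-line test (strip().startswith("fail_count:")) is "label prefixes the lstrip"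
theorem testA_iff (line : List Char) :
    PySem.Chars.startswith (PySem.Chars.strip line) "fail_count:".toList = true ↔
    pvLabel <+: PySem.Chars.lstrip line := by
  rw [PySem.Chars.startswith_iff]
  constructor
  · intro h
    exact h.trans (rstrip_prefix _)
  · intro h
    obtain ⟨v, hv⟩ := h
    show "fail_count:".toList <+: PySem.Chars.rstrip (PySem.Chars.lstrip line)
    rw [← hv]
    show "fail_count:".toList <+:
      (List.dropWhile PySem.Chars.isspace (pvLabel ++ v).reverse).reverse
    rw [List.reverse_append, List.dropWhile_append]
    by_cases hd : (List.dropWhile PySem.Chars.isspace v.reverse).isEmpty = true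
    · simp only [hd, if_true]
      have : List.dropWhile PySem.Chars.isspace pvLabel.reverse = pvLabel.reverse := by decide
      rw [this]
      simp [pvLabel]
    · simp only [hd, Bool.false_eq_true, if_false, List.reverse_append, List.reverse_reverse]
      exact ⟨(List.dropWhile PySem.Chars.isspace v.reverse).reverse, by simp [pvLabel]⟩

-- ===== automaton characterization =====

-- crossing a newline: a clean line either decides the result or resets the machine
theorem scan_split : ∀ (line : List Char), '\n' ∉ line → ∀ (rest : List Char) (s : Int) (b : Option (List Char)),
    scanB (line ++ '\n' :: rest) s b
      = match scanB line s b with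
        | some v => some v
        | none => scanB rest 0 none := by
  intro line
  induction line with
  | nil =>
    intro _ rest s b
    cases b <;> simp [scanB]
  | cons c cs ih =>
    intro hnl rest s b
    have hc : ¬ c = '\n' := fun h => hnl (h ▸ List.mem_cons_self)
    have hcs : '\n' ∉ cs := fun h => hnl (List.mem_cons_of_mem _ h)
    cases b with
    | some bv =>
      by_cases hcol : c = ':'
      · simp [scanB, hcol]
      · simp only [List.cons_append, scanB, if_neg hc, if_neg hcol]
        exact ih hcs rest s (some (bv ++ [c]))
    | none =>
      simp only [List.cons_append, scanB, if_neg hc]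
      by_cases h1 : s = -1
      · simp only [if_pos h1]; exact ih hcs rest (-1) none
      · simp only [if_neg h1]
        by_cases h2 : some c = PySem.List.pyGet? pvLabel s
        · simp only [if_pos h2]
          by_cases h3 : s + 1 = (pvLabel.length : Int)
          · simp only [if_pos h3]; exact ih hcs rest (s + 1) (some [])
          · simp only [if_neg h3]; exact ih hcs rest (s + 1) none
        · simp only [if_neg h2]
          by_cases h4 : s = 0 ∧ PySem.Chars.isspace c = true
          · simp only [if_pos h4]; exact ih hcs rest 0 none
          · simp only [if_neg h4]; exact ih hcs rest (-1) none

-- collect phase: once buf is open, the value chars up to the next ':' are gathered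
theorem scan_collect : ∀ (u : List Char), '\n' ∉ u → ∀ (s : Int) (b : List Char),
    scanB u s (some b) = some (b ++ u.takeWhile (· ≠ ':')) := by
  intro u
  induction u with
  | nil => intro _ s b; simp [scanB]
  | cons c cs ih =>
    intro hnl s b
    have hc : ¬ c = '\n' := fun h => hnl (h ▸ List.mem_cons_self)
    have hcs : '\n' ∉ cs := fun h => hnl (List.mem_cons_of_mem _ h)
    by_cases hcol : c = ':'
    · simp [scanB, hcol, List.takeWhile]
    · simp only [scanB, if_neg hc, if_neg hcol, ih hcs s (b ++ [c]), List.takeWhile]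
      simp [hcol]

-- dead state: a -1 line never produces a value
theorem scan_dead : ∀ (u : List Char), '\n' ∉ u → scanB u (-1) none = none := by
  intro u
  induction u with
  | nil => intro _; simp [scanB]
  | cons c cs ih =>
    intro hnl
    have hc : ¬ c = '\n' := fun h => hnl (h ▸ List.mem_cons_self)
    have hcs : '\n' ∉ cs := fun h => hnl (List.mem_cons_of_mem _ h)
    simp [scanB, hc, ih hcs]

-- mid-label states 1..10: the rest of the label must follow verbatim
theorem scan_mid : ∀ (u : List Char) (k : Nat), 1 ≤ k → k ≤ 10 → '\n' ∉ u →
    scanB u (k : Int) none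
      = if pvLabel.drop k <+: u then some ((u.drop (11 - k)).takeWhile (· ≠ ':')) else none := by
  intro u
  induction u with
  | nil =>
    intro k hk1 hk10 _
    rw [if_neg]
    · simp [scanB]
    · intro hpre
      have hlen := hpre.length_le
      simp [pvLabel] at hlen
      omega
  | cons c cs ih =>
    intro k hk1 hk10 hnl
    have hc : ¬ c = '\n' := fun h => hnl (h ▸ List.mem_cons_self)
    have hcs : '\n' ∉ cs := fun h => hnl (List.mem_cons_of_mem _ h)
    have hklen : k < pvLabel.length := by simp [pvLabel]; omega
    have hget : PySem.List.pyGet? pvLabel (k : Int) = some pvLabel[k] := by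
      simp [PySem.List.pyGet?_natCast, List.getElem?_eq_getElem hklen]
    have hne : ¬ (k : Int) = -1 := by omega
    have hdropcons : pvLabel.drop k = pvLabel[k] :: pvLabel.drop (k + 1) :=
      List.drop_eq_getElem_cons hklen
    simp only [scanB, if_neg hc, if_neg hne, hget]
    by_cases hm : c = pvLabel[k]
    · subst hm
      simp only [if_true]
      by_cases h11 : k = 10
      · subst h11
        have h11' : ((10 : Nat) : Int) + 1 = (pvLabel.length : Int) := by simp [pvLabel]
        have hdl : pvLabel.drop 10 = [':'] := by decide
        have hrest : pvLabel.drop (10 + 1) = [] := by decide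
        rw [hdl, hrest] at hdropcons
        have h10 : pvLabel[(10 : Nat)] = ':' := by
          simpa using hdropcons.symm
        have hpre : pvLabel.drop 10 <+: pvLabel[(10 : Nat)] :: cs := by
          rw [hdl, h10]
          exact ⟨cs, rfl⟩
        rw [if_pos h11', scan_collect cs hcs, if_pos hpre]
        simp
      · have hlt : ¬ ((k : Nat) : Int) + 1 = (pvLabel.length : Int) := by
          simp [pvLabel]; omega
        rw [if_neg hlt]
        have : ((k : Nat) : Int) + 1 = ((k + 1 : Nat) : Int) := by push_cast; ring
        rw [this, ih (k + 1) (by omega) (by omega) hcs]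
        have hiff : pvLabel.drop (k + 1) <+: cs ↔ pvLabel.drop k <+: pvLabel[k] :: cs := by
          rw [hdropcons]
          exact (List.cons_prefix_cons.trans (by simp)).symm
        by_cases hp : pvLabel.drop (k + 1) <+: cs
        · rw [if_pos hp, if_pos (hiff.mp hp)]
          have : (pvLabel[k] :: cs).drop (11 - k) = cs.drop (11 - (k + 1)) := by
            have : 11 - k = (11 - (k + 1)) + 1 := by omega
            simp [this]
          rw [this]
        · rw [if_neg hp, if_neg (fun h => hp (hiff.mpr h))]
    · have hmm : ¬ some c = some pvLabel[k] := by simp [hm]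
      rw [if_neg hmm, if_neg (by rintro ⟨h0, -⟩; omega), scan_dead cs hcs, if_neg]
      intro hpre
      rw [hdropcons] at hpre
      exact hm (List.cons_prefix_cons.mp hpre).1.symm

-- a whole newline-free line from the initial state
theorem scan_line : ∀ (line : List Char), '\n' ∉ line →
    scanB line 0 none
      = if pvLabel <+: PySem.Chars.lstrip line
        then some (((PySem.Chars.lstrip line).drop 11).takeWhile (· ≠ ':'))
        else none := by
  intro line
  induction line with
  | nil =>
    intro _
    rw [if_neg]
    · simp [scanB]
    · intro hpre
      have := hpre.length_le
      simp [PySem.Chars.lstrip, pvLabel] at this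
  | cons c cs ih =>
    intro hnl
    have hc : ¬ c = '\n' := fun h => hnl (h ▸ List.mem_cons_self)
    have hcs : '\n' ∉ cs := fun h => hnl (List.mem_cons_of_mem _ h)
    have hget0 : PySem.List.pyGet? pvLabel (0 : Int) = some 'f' := by decide
    simp only [scanB, if_neg hc, if_neg (by decide : ¬ (0 : Int) = -1), hget0]
    by_cases hsp : PySem.Chars.isspace c = true
    · have hcf : ¬ c = 'f' := by
        intro h; subst h; exact absurd hsp (by decide)
      have hls : PySem.Chars.lstrip (c :: cs) = PySem.Chars.lstrip cs := by
        simp [PySem.Chars.lstrip, hsp]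
      rw [if_neg (by simp [hcf]), if_pos (by simp [hsp]), hls]
      exact ih hcs
    · have hls : PySem.Chars.lstrip (c :: cs) = c :: cs := by
        simp [PySem.Chars.lstrip, hsp]
      rw [hls]
      by_cases hcf : c = 'f'
      · subst hcf
        rw [if_pos rfl, if_neg (by decide : ¬ (0 : Int) + 1 = (pvLabel.length : Int))]
        have h01 : (0 : Int) + 1 = ((1 : Nat) : Int) := by norm_num
        rw [h01, scan_mid cs 1 (by omega) (by omega) hcs]
        have hiff : pvLabel.drop 1 <+: cs ↔ pvLabel <+: 'f' :: cs := by
          have : pvLabel = 'f' :: pvLabel.drop 1 := by decide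
          conv_rhs => rw [this]
          exact (List.cons_prefix_cons.trans (by simp)).symm
        by_cases hp : pvLabel.drop 1 <+: cs
        · rw [if_pos hp, if_pos (hiff.mp hp)]
          simp
        · rw [if_neg hp, if_neg (fun h => hp (hiff.mpr h))]
      · rw [if_neg (by simp [hcf]), if_neg (by rintro ⟨-, h⟩; exact hsp h),
          scan_dead cs hcs, if_neg]
        intro hpre
        have : pvLabel = 'f' :: pvLabel.drop 1 := by decide
        rw [this] at hpre
        exact hcf (List.cons_prefix_cons.mp hpre).1.symm

-- A's extracted piece (split(":")[1]) on a matching line equals the automaton's buf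
theorem pieceA (line : List Char) (h : pvLabel <+: PySem.Chars.lstrip line) :
    PySem.List.pyGet? (PySem.Chars.splitOn line [':']) 1
      = some (((PySem.Chars.lstrip line).drop 11).takeWhile (· ≠ ':')) := by
  obtain ⟨u, hu⟩ := h
  have hdrop : (PySem.Chars.lstrip line).drop 11 = u := by
    rw [← hu]; simp [pvLabel]
  have hline : line = (List.takeWhile PySem.Chars.isspace line ++ "fail_count".toList)
      ++ ':' :: u := by
    have h1 : line = List.takeWhile PySem.Chars.isspace line ++ PySem.Chars.lstrip line :=
      (List.takeWhile_append_dropWhile (p := PySem.Chars.isspace) (l := line)).symm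
    have h3 : pvLabel ++ u = "fail_count".toList ++ ':' :: u := by
      have h2 : (pvLabel : List Char) = "fail_count".toList ++ [':'] := by decide
      rw [h2, List.append_assoc]
      rfl
    conv_lhs => rw [h1]
    rw [← hu, h3]
    simp [List.append_assoc]
  have hp : pypart ':' line
      = some (List.takeWhile PySem.Chars.isspace line ++ "fail_count".toList, u) := by
    rw [pypart_some_iff]
    refine ⟨hline, ?_⟩
    intro hm
    rcases List.mem_append.mp hm with hw | hf
    · exact absurd (mem_takeWhile_sat hw) (by decide)
    · exact absurd hf (by decide)
  rw [splitOn_char, mySplit_eq_part]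
  simp only [hp, List.nil_append]
  obtain ⟨r, hr⟩ := mySplit_first ':' u []
  rw [hr, hdrop]
  simp [PySem.List.pyGet?, PySem.List.pyIdx?]

-- one step of A's loop, phrased through the automaton's per-line outcome
theorem lineAB (line : List Char) (rest : List (List Char)) (hnl : '\n' ∉ line) :
    getFailA (line :: rest)
      = match scanB line 0 none with
        | some b => (PySem.Int.ofChars? (PySem.Chars.strip b)).getD 0
        | none => getFailA rest := by
  rw [scan_line line hnl]
  by_cases h : pvLabel <+: PySem.Chars.lstrip line
  · rw [if_pos h]
    have ht := (testA_iff line).mpr h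
    simp only [getFailA, ht, if_pos, pieceA line h]
    cases PySem.Int.ofChars? (PySem.Chars.strip
        (((PySem.Chars.lstrip line).drop 11).takeWhile (· ≠ ':'))) <;> simp
  · rw [if_neg h]
    simp only [getFailA]
    rw [if_neg (fun ht => h ((testA_iff line).mp ht))]

theorem mainAB : ∀ (n : Nat) (cs : List Char), cs.length ≤ n →
    getFailA (mySplit '\n' [] cs)
      = match scanB cs 0 none with
        | none => 0
        | some b => (PySem.Int.ofChars? (PySem.Chars.strip b)).getD 0 := by
  intro n
  induction n with
  | zero =>
    intro cs hl
    have hnil : cs = [] := List.eq_nil_of_length_eq_zero (Nat.le_zero.mp hl)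
    subst hnil
    decide
  | succ f ih =>
    intro cs hl
    cases hp : pypart '\n' cs with
    | none =>
      have hnl : '\n' ∉ cs := (pypart_none_iff '\n' cs).mp hp
      rw [mySplit_eq_part]
      simp only [hp, List.nil_append]
      rw [lineAB cs [] hnl]
      cases scanB cs 0 none <;> simp [getFailA]
    | some p =>
      obtain ⟨line, tail⟩ := p
      obtain ⟨hcs, hnl⟩ := (pypart_some_iff '\n' cs line tail).mp hp
      have ht : tail.length ≤ f := by
        subst hcs; simp at hl; omega
      rw [mySplit_eq_part]
      simp only [hp, List.nil_append]
      rw [lineAB line (mySplit '\n' [] tail) hnl]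
      subst hcs
      rw [scan_split line hnl tail 0 none]
      cases scanB line 0 none with
      | some b => simp
      | none => simp only; exact ih tail ht

-- ===== VERDICT (by name: the statement is the Claim_ definition above) =====
theorem get_fail_count_py_spec : Claim_equal_get_fail_count_py := by
  intro content _
  unfold Spec_get_fail_count_py get_fail_count_py get_fail_count_py_alt
  rw [splitOn_char]
  rw [mainAB content.toList.length content.toList (Nat.le_refl _)]
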